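-- pv_equiv track=rewrite | github.com/biol5472-uofglasgow/GroupB_Project | src/Gene_Model_Summariser/QC_check.py | ambiguous_bases
-- ===== SOURCE A (Python) =====
-- def ambiguous_bases(sequence: str) -> bool:
--     """
--     checks for ambiguous bases in the sequence (bases other than A, C, G, T, N).
--     Returns True if ambiguous bases are found, otherwise False.
--     """
--     if not sequence:
--         return False
--     valid_bases = set('ACGTN')
--     sequence = sequence.upper() # Convert sequence to uppercase for uniformity
--     for base in sequence:
--         if base not in valid_bases:
--             return True
--     return False
-- ===== SOURCE B (Python) =====
-- def ambiguous_bases(sequence: str) -> bool: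
--     """
--     checks for ambiguous bases in the sequence (bases other than A, C, G, T, N).
--     Returns True if ambiguous bases are found, otherwise False.
--     """
--     s = sequence.upper()
--     return len(s) != sum(s.count(b) for b in 'ACGTN')
-- ===== Notes on version B (the rewrite author's own statement) =====
-- stated objective: alternative
-- what changed: Replaces the per-character membership loop with early exit by an arithmetic check: the sequence contains an ambiguous base iff its length differs from the sum of the occurrence counts of the five valid bases (counted with str.count).
import Mathlib
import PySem

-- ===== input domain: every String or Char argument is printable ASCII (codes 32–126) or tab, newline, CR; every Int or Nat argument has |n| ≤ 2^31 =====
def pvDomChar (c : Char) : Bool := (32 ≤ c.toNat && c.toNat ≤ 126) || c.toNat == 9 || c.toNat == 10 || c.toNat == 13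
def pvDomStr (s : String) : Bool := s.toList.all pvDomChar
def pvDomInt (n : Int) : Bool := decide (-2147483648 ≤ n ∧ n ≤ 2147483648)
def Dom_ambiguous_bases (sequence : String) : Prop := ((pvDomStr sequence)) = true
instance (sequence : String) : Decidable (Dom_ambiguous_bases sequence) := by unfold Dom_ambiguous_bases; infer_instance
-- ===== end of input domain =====

-- B replaces A's membership loop by an arithmetic identity: ambiguous iff the length
-- differs from the sum of the counts of the five valid bases (alternative strategy).

-- ===== PORT A =====
-- the loop 'for base in sequence: if base not in valid_bases: return True' / 'return False'
def ambLoop_A (valid : PySem.Set Char) : List Char → Bool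
  | [] => false
  | c :: cs => if PySem.Set.contains valid c = false then true else ambLoop_A valid cs

def ambiguous_bases (sequence : String) : Bool :=
  if sequence = "" then false
  else
    let valid_bases : PySem.Set Char := PySem.Set.ofList "ACGTN".toList
    ambLoop_A valid_bases (PySem.Str.upper sequence).toList

-- ===== PORT B =====
def ambiguous_bases_alt (sequence : String) : Bool :=
  -- s = sequence.upper(); return len(s) != sum(s.count(b) for b in 'ACGTN')
  let s := PySem.Str.upper sequence
  decide ((PySem.Str.len s : Int) ≠
    ("ACGTN".toList.map (fun b => (PySem.Str.count s (String.ofList [b]) : Int))).sum)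

-- ===== PRECONDITION & SPEC =====
def Spec_ambiguous_bases (sequence : String) (out : Bool) : Prop := out = ambiguous_bases_alt sequence
instance (sequence : String) (out : Bool) : Decidable (Spec_ambiguous_bases sequence out) := by unfold Spec_ambiguous_bases; infer_instance

-- ===== CLAIM (what is proved, stated in full; the proofs are below) =====
def Claim_equal_ambiguous_bases : Prop := ∀ (sequence : String), Dom_ambiguous_bases sequence → Spec_ambiguous_bases sequence (ambiguous_bases sequence)

-- ===== LEMMAS AND PROOFS =====

theorem ambLoop_A_eq_any (valid : PySem.Set Char) (l : List Char) :
    ambLoop_A valid l = decide (∃ c ∈ l, c ∉ valid) := by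
  induction l with
  | nil => simp [ambLoop_A]
  | cons c cs ih =>
    simp only [ambLoop_A, ih]
    by_cases h : c ∈ valid
    · simp [h]
    · simp [h]

-- substring count of a single character is the character count
theorem count_go_single (c : Char) : ∀ (fuel : Nat) (l : List Char) (acc : Nat),
    l.length ≤ fuel → PySem.Chars.count.go [c] fuel l acc = acc + l.count c := by
  intro fuel
  induction fuel with
  | zero =>
    intro l acc h
    have : l = [] := List.eq_nil_of_length_eq_zero (Nat.le_zero.mp h)
    subst this; simp [PySem.Chars.count.go]
  | succ n ih =>
    intro l acc h
    cases l with
    | nil => simp [PySem.Chars.count.go]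
    | cons a t =>
      have ht : t.length ≤ n := by
        simp only [List.length_cons] at h; omega
      simp only [PySem.Chars.count.go]
      by_cases hca : c = a
      · subst hca
        have hp : List.isPrefixOf [c] (c :: t) = true := by
          simp [List.isPrefixOf]
        simp only [hp, if_true, List.length_cons, List.length_nil, List.drop_succ_cons,
          List.drop_zero]
        rw [ih t (acc + 1) ht]
        simp
        omega
      · have hp : List.isPrefixOf [c] (a :: t) = false := by
          simp [List.isPrefixOf, hca]
        rw [if_neg (by simp [hp]), ih t acc ht]
        have hac : ¬ a = c := fun hh => hca hh.symm
        simp [hac]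

theorem count_single (l : List Char) (c : Char) :
    PySem.Chars.count l [c] = l.count c := by
  have : PySem.Chars.count l [c] = PySem.Chars.count.go [c] l.length l 0 := by
    simp [PySem.Chars.count]
  rw [this, count_go_single c l.length l 0 (le_refl _)]
  simp

-- sum of the five base counts = number of valid characters
theorem sum5 (l : List Char) :
    l.count 'A' + l.count 'C' + l.count 'G' + l.count 'T' + l.count 'N'
      = l.countP (fun c => decide (c ∈ (['A','C','G','T','N'] : List Char))) := by
  induction l with
  | nil => simp
  | cons a t ih =>
    simp only [List.count_cons, List.countP_cons]
    by_cases hA : a = 'A' <;> by_cases hC : a = 'C' <;> by_cases hG : a = 'G' <;>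
      by_cases hT : a = 'T' <;> by_cases hN : a = 'N' <;>
      simp_all <;> omega

-- ===== VERDICT (by name: the statement is the Claim_ definition above) =====
theorem ambiguous_bases_spec : Claim_equal_ambiguous_bases := by
  intro s _
  unfold Spec_ambiguous_bases ambiguous_bases ambiguous_bases_alt
  by_cases h : s = ""
  · subst h; decide
  · rw [if_neg h]
    rw [ambLoop_A_eq_any]
    set u := (PySem.Str.upper s).toList with hu
    simp only [PySem.Str.count_eq, PySem.Str.len_eq, String.toList_ofList,
      show "ACGTN".toList = ['A','C','G','T','N'] from rfl,
      List.map_cons, List.map_nil, List.sum_cons, List.sum_nil, count_single]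
    rw [← hu, decide_eq_decide]
    have hsum : (u.count 'A' : Int) + ((u.count 'C' : Int) + ((u.count 'G' : Int)
        + ((u.count 'T' : Int) + ((u.count 'N' : Int) + 0))))
        = (u.countP (fun c => decide (c ∈ (['A','C','G','T','N'] : List Char))) : Int) := by
      rw [← sum5]; push_cast; ring
    rw [hsum]
    have hle : u.countP (fun c => decide (c ∈ (['A','C','G','T','N'] : List Char))) ≤ u.length :=
      List.countP_le_length
    constructor
    · rintro ⟨c, hc, hv⟩
      have hcv : ¬ c ∈ (['A','C','G','T','N'] : List Char) := by
        intro hm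
        exact hv (by simpa [PySem.Set.mem_ofList] using hm)
      intro heq
      have : ∀ a ∈ u, (fun c => decide (c ∈ (['A','C','G','T','N'] : List Char))) a = true := by
        apply List.countP_eq_length.mp
        omega
      exact hcv (by simpa using this c hc)
    · intro hne
      by_contra hno
      push Not at hno
      have : ∀ a ∈ u, (fun c => decide (c ∈ (['A','C','G','T','N'] : List Char))) a = true := by
        intro a ha
        have := hno a ha
        
        simpa [PySem.Set.mem_ofList] using this
      have := List.countP_eq_length.mpr this
      omega
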